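-- pv_equiv track=rewrite | github.com/olppaemi/algo | Problem_Solving_Paradigms/Complete_Search/UVa_11565_Simple_Equations.py | solution
-- ===== SOURCE A (Python) =====
-- def solution(a, b, c):
--     for x in range(-22, 23):
--         if x * x <= c:
--             for y in range(-100, 101):
--                 if y != x and x * x + y * y <= c:
--                     for z in range(-100, 100):
--                         if z != x and z != y and x+y+z == a and x*y*z == b and x*x + y*y + z*z == c:
--                             return x, y, z
--     return 0, 0, 0
-- ===== SOURCE B (Python) =====
-- def solution(a, b, c):
--     # z = a - x - y is forced by the sum equation; enumerate candidates lazily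
--     # as one comprehension pipeline and take the first hit.
--     cands = ((x, y, a - x - y)
--              for x in range(-22, 23) if x * x <= c
--              for y in range(-100, 101)
--              if y != x and x * x + y * y <= c
--              and -100 <= a - x - y <= 99
--              and a - x - y != x and a - x - y != y
--              and x * y * (a - x - y) == b
--              and x * x + y * y + (a - x - y) * (a - x - y) == c)
--     return next(cands, (0, 0, 0))
-- ===== Notes on version B (the rewrite author's own statement) =====
-- stated objective: faster
-- what changed: A's inner z-loop disappears: z = a-x-y is forced by the sum equation, and B replaces the three nested early-return loops by a single lazy comprehension pipeline over (x,y) pairs from which next() takes the first valid triple.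
import Mathlib
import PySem

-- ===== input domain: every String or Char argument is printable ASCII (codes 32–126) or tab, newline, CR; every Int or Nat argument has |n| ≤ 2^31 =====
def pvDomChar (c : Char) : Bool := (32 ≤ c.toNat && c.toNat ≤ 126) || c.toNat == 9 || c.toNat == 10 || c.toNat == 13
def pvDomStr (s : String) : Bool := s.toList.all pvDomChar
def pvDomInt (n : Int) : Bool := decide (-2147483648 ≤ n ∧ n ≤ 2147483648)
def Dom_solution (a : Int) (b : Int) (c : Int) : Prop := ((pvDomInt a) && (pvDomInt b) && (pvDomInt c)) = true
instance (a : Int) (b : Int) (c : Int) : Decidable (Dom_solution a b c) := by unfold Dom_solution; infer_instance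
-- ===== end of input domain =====

-- B drops A's inner z-loop (z = a - x - y is forced) and replaces the nested loops by a
-- comprehension pipeline (flatMap/filterMap) whose first element is the answer (objective: faster).

-- ===== PORT A =====
-- inner 'for z in range(-100, 100)' with an early return
def solFindZ (a b c x y : Int) : List Int → Option (Int × Int × Int)
  | [] => none
  | z :: zs =>
    if z ≠ x ∧ z ≠ y ∧ x + y + z = a ∧ x * y * z = b ∧ x * x + y * y + z * z = c then
      some (x, y, z)
    else solFindZ a b c x y zs

-- 'for y in range(-100, 101)' with the guard and propagated return
def solFindY (a b c x : Int) : List Int → Option (Int × Int × Int)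
  | [] => none
  | y :: ys =>
    if y ≠ x ∧ x * x + y * y ≤ c then
      match solFindZ a b c x y (PySem.List.pyRange (-100) 100 1) with
      | some r => some r
      | none => solFindY a b c x ys
    else solFindY a b c x ys

-- 'for x in range(-22, 23)' with the guard and propagated return
def solFindX (a b c : Int) : List Int → Option (Int × Int × Int)
  | [] => none
  | x :: xs =>
    if x * x ≤ c then
      match solFindY a b c x (PySem.List.pyRange (-100) 101 1) with
      | some r => some r
      | none => solFindX a b c xs
    else solFindX a b c xs

def solution (a : Int) (b : Int) (c : Int) : List Int :=
  match solFindX a b c (PySem.List.pyRange (-22) 23 1) with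
  | some (x, y, z) => [x, y, z]
  | none => [0, 0, 0]

-- ===== PORT B =====
-- the comprehension's per-y filter: all conditions on (x, y) with the forced z = a - x - y
def altFilter (a b c x y : Int) : Option (Int × Int × Int) :=
  if y ≠ x ∧ x * x + y * y ≤ c ∧ -100 ≤ a - x - y ∧ a - x - y ≤ 99 ∧
     a - x - y ≠ x ∧ a - x - y ≠ y ∧ x * y * (a - x - y) = b ∧
     x * x + y * y + (a - x - y) * (a - x - y) = c then
    some (x, y, a - x - y)
  else none

-- the candidate pipeline ('cands' in Source B) and next(cands, (0,0,0))
def solution_alt (a : Int) (b : Int) (c : Int) : List Int :=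
  let cands : List (Int × Int × Int) :=
    (PySem.List.pyRange (-22) 23 1).flatMap (fun x =>
      if x * x ≤ c then (PySem.List.pyRange (-100) 101 1).filterMap (altFilter a b c x)
      else [])
  match cands.head? with
  | some (x, y, z) => [x, y, z]
  | none => [0, 0, 0]

-- ===== PRECONDITION & SPEC =====
def Spec_solution (a : Int) (b : Int) (c : Int) (out : List Int) : Prop := out = solution_alt a b c
instance (a : Int) (b : Int) (c : Int) (out : List Int) : Decidable (Spec_solution a b c out) := by unfold Spec_solution; infer_instance

-- ===== CLAIM (what is proved, stated in full; the proofs are below) =====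
def Claim_equal_solution : Prop := ∀ (a : Int) (b : Int) (c : Int), Dom_solution a b c → Spec_solution a b c (solution a b c)

-- ===== LEMMAS AND PROOFS =====

-- The z-scan returns some iff the forced z = a - x - y lies in zs and satisfies the rest.
theorem solFindZ_eq (a b c x y : Int) (zs : List Int) :
    solFindZ a b c x y zs =
      (if (a - x - y) ∈ zs ∧ (a - x - y) ≠ x ∧ (a - x - y) ≠ y ∧
          x * y * (a - x - y) = b ∧ x * x + y * y + (a - x - y) * (a - x - y) = c then
        some (x, y, a - x - y) else none) := by
  induction zs with
  | nil => simp [solFindZ]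
  | cons z zs ih =>
    by_cases hz : x + y + z = a
    · have ha : a - x - y = z := by omega
      rw [solFindZ, ih, ha]
      simp only [List.mem_cons]
      split_ifs <;> tauto
    · have ha : ¬ (a - x - y = z) := by omega
      have hcond : ¬ (z ≠ x ∧ z ≠ y ∧ x + y + z = a ∧ x * y * z = b ∧ x * x + y * y + z * z = c) := by
        intro h; exact hz h.2.2.1
      rw [solFindZ, if_neg hcond, ih]
      simp only [List.mem_cons, ha, false_or]

-- A's y-loop over any ys equals the head of B's filterMap over ys.
theorem solFindY_eq_head (a b c x : Int) (ys : List Int) :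
    solFindY a b c x ys = (ys.filterMap (altFilter a b c x)).head? := by
  induction ys with
  | nil => rfl
  | cons y ys ih =>
    rw [solFindY, List.filterMap_cons]
    by_cases hg : y ≠ x ∧ x * x + y * y ≤ c
    · rw [if_pos hg, solFindZ_eq]
      by_cases hzc : (a - x - y) ≠ x ∧ (a - x - y) ≠ y ∧
          x * y * (a - x - y) = b ∧ x * x + y * y + (a - x - y) * (a - x - y) = c
      · by_cases hrange : -100 ≤ a - x - y ∧ a - x - y ≤ 99
        · have hmem : (a - x - y) ∈ PySem.List.pyRange (-100) 100 1 := by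
            rw [PySem.List.mem_pyRange_one]; omega
          rw [if_pos ⟨hmem, hzc⟩]
          have : altFilter a b c x y = some (x, y, a - x - y) := by
            unfold altFilter
            exact if_pos ⟨hg.1, hg.2, hrange.1, hrange.2, hzc⟩
          rw [this]; rfl
        · have hnm : ¬ ((a - x - y) ∈ PySem.List.pyRange (-100) 100 1 ∧ (a - x - y) ≠ x ∧ (a - x - y) ≠ y ∧
              x * y * (a - x - y) = b ∧ x * x + y * y + (a - x - y) * (a - x - y) = c) := by
            intro h
            rw [PySem.List.mem_pyRange_one] at h
            exact hrange ⟨by omega, by omega⟩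
          rw [if_neg hnm]
          have : altFilter a b c x y = none := by
            unfold altFilter
            apply if_neg; intro h; exact hrange ⟨h.2.2.1, h.2.2.2.1⟩
          rw [this, ih]
      · have hnm : ¬ ((a - x - y) ∈ PySem.List.pyRange (-100) 100 1 ∧ (a - x - y) ≠ x ∧ (a - x - y) ≠ y ∧
            x * y * (a - x - y) = b ∧ x * x + y * y + (a - x - y) * (a - x - y) = c) := by
          intro h; exact hzc h.2
        rw [if_neg hnm]
        have : altFilter a b c x y = none := by
          unfold altFilter
          apply if_neg; intro h
          exact hzc ⟨h.2.2.2.2.1, h.2.2.2.2.2.1, h.2.2.2.2.2.2.1, h.2.2.2.2.2.2.2⟩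
        rw [this, ih]
    · rw [if_neg hg]
      have : altFilter a b c x y = none := by
        unfold altFilter
        apply if_neg; intro h; exact hg ⟨h.1, h.2.1⟩
      rw [this, ih]

-- A's x-loop over any xs equals the head of B's flatMap over xs.
theorem solFindX_eq_head (a b c : Int) (xs : List Int) :
    solFindX a b c xs =
      (xs.flatMap (fun x =>
        if x * x ≤ c then (PySem.List.pyRange (-100) 101 1).filterMap (altFilter a b c x)
        else [])).head? := by
  induction xs with
  | nil => rfl
  | cons x xs ih =>
    rw [solFindX, List.flatMap_cons, List.head?_append]
    by_cases hg : x * x ≤ c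
    · rw [if_pos hg, if_pos hg, solFindY_eq_head, ih]
      cases ((PySem.List.pyRange (-100) 101 1).filterMap (altFilter a b c x)).head? with
      | none => simp [Option.or]
      | some r => simp [Option.or]
    · rw [if_neg hg, if_neg hg, ih]
      simp [Option.or]

-- ===== VERDICT (by name: the statement is the Claim_ definition above) =====
theorem solution_spec : Claim_equal_solution := by
  intro a b c _
  unfold Spec_solution solution solution_alt
  rw [solFindX_eq_head]
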